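-- pv_equiv track=rewrite | github.com/micjo/waspy | projects/service_mill/service_mill/rbs_random_csv_to_json.py | get_sections
-- ===== SOURCE A (Python) =====
-- def get_sections(csv_text: str):
--     section_text = ""
--     sections = []
--     for line in csv_text.splitlines(keepends=True):
--         if not line.startswith(",,"):
--             section_text += line
--         else:
--             sections.append(section_text)
--             section_text = ""
--     sections.append(section_text)
--     return sections
-- ===== SOURCE B (Python) =====
-- def get_sections(csv_text: str):
--     lines = csv_text.splitlines(keepends=True)
--     seps = [i for i, l in enumerate(lines) if l.startswith(",,")]
--     sections = []
--     start = 0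
--     for s in seps:
--         sections.append("".join(lines[start:s]))
--         start = s + 1
--     sections.append("".join(lines[start:]))
--     return sections
-- ===== Notes on version B (the rewrite author's own statement) =====
-- stated objective: alternative
-- what changed: Instead of accumulating section text line by line in a growing string, B first collects the indices of the separator lines (those starting with two commas) and then emits each section by joining a slice of the line list between consecutive separators.
import Mathlib
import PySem

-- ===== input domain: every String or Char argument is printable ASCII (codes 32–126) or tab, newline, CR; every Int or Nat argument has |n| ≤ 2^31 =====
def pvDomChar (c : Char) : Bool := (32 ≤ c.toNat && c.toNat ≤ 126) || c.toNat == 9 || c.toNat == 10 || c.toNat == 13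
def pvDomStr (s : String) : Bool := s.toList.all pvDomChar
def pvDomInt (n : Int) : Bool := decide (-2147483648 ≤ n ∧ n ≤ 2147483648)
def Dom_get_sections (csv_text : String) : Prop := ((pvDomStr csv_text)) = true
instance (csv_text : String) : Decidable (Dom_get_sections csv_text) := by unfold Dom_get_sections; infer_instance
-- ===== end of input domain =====

-- B replaces A's line-by-line text accumulator with a separator-index pass followed by slice-and-join; same cost, different decomposition.

-- shared helper: csv_text.splitlines(keepends=True).  Exact on Dom (whose only line
-- break characters are '\n', '\r' and "\r\n"; Python's extra breaks \v, \f, … lie outside Dom).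
def pvSplitKeep : List Char → List (List Char)
  | [] => []
  | '\r' :: '\n' :: rest => ['\r', '\n'] :: pvSplitKeep rest
  | '\r' :: rest => ['\r'] :: pvSplitKeep rest
  | '\n' :: rest => ['\n'] :: pvSplitKeep rest
  | c :: rest =>
    match pvSplitKeep rest with
    | [] => [[c]]
    | h :: t => (c :: h) :: t

-- ===== PORT A =====
-- the loop body: state (section_text, sections); strings carried as List Char, String.ofList at the end
def pvStepA (st : List Char × List (List Char)) (line : List Char) : List Char × List (List Char) :=
  if ¬ (PySem.Chars.startswith line [',', ','] = true) then (st.1 ++ line, st.2)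
  else ([], st.2 ++ [st.1])

def get_sections (csv_text : String) : List String :=
  let r := (pvSplitKeep csv_text.toList).foldl pvStepA ([], [])
  (r.2 ++ [r.1]).map String.ofList

-- ===== PORT B =====
-- seps = [i for i, l in enumerate(lines) if l.startswith(",,")]
def pvSeps : List (List Char) → Int → List Int
  | [], _ => []
  | l :: ls, i =>
    if PySem.Chars.startswith l [',', ','] = true then i :: pvSeps ls (i + 1)
    else pvSeps ls (i + 1)

-- the for-loop over seps with the start cursor, plus the final "".join(lines[start:]) append
def pvBuild (lines : List (List Char)) : List Int → Int → List (List Char)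
  | [], start => [PySem.Chars.join [] (PySem.List.slice lines (some start) none)]
  | s :: rest, start =>
    PySem.Chars.join [] (PySem.List.slice lines (some start) (some s)) :: pvBuild lines rest (s + 1)

def get_sections_alt (csv_text : String) : List String :=
  let lines := pvSplitKeep csv_text.toList
  (pvBuild lines (pvSeps lines 0) 0).map String.ofList

-- ===== PRECONDITION & SPEC =====
def Spec_get_sections (csv_text : String) (out : List String) : Prop := out = get_sections_alt csv_text
instance (csv_text : String) (out : List String) : Decidable (Spec_get_sections csv_text out) := by unfold Spec_get_sections; infer_instance

-- ===== CLAIM (what is proved, stated in full; the proofs are below) =====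
def Claim_equal_get_sections : Prop := ∀ (csv_text : String), Dom_get_sections csv_text → Spec_get_sections csv_text (get_sections csv_text)

-- ===== LEMMAS AND PROOFS =====

-- recursive characterization of A's loop
def pvFRec : List (List Char) → List Char → List (List Char)
  | [], acc => [acc]
  | l :: ls, acc =>
    if PySem.Chars.startswith l [',', ','] = true then acc :: pvFRec ls []
    else pvFRec ls (acc ++ l)

lemma pvFoldl_eq (lines : List (List Char)) :
    ∀ (acc : List Char) (secs : List (List Char)),
      (lines.foldl pvStepA (acc, secs)).2 ++ [(lines.foldl pvStepA (acc, secs)).1]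
        = secs ++ pvFRec lines acc := by
  induction lines with
  | nil => intro acc secs; simp [pvFRec]
  | cons l ls ih =>
    intro acc secs
    rw [List.foldl_cons]
    by_cases h : PySem.Chars.startswith l [',', ','] = true
    · rw [show pvStepA (acc, secs) l = ([], secs ++ [acc]) by simp [pvStepA, h], ih]
      simp [pvFRec, h]
    · rw [show pvStepA (acc, secs) l = (acc ++ l, secs) by simp [pvStepA, h], ih]
      simp [pvFRec, h]

lemma pvSeps_shift (ls : List (List Char)) : ∀ i : Int, pvSeps ls (i + 1) = (pvSeps ls i).map (· + 1) := by
  induction ls with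
  | nil => intro i; simp [pvSeps]
  | cons l ls ih =>
    intro i
    by_cases h : PySem.Chars.startswith l [',', ','] = true <;> simp [pvSeps, h, ih]

lemma pvSeps_nonneg (ls : List (List Char)) : ∀ (i x : Int), x ∈ pvSeps ls i → i ≤ x := by
  induction ls with
  | nil => intro i x hx; simp [pvSeps] at hx
  | cons l ls ih =>
    intro i x hx
    by_cases h : PySem.Chars.startswith l [',', ','] = true <;> simp [pvSeps, h] at hx
    · rcases hx with rfl | hx
      · omega
      · have := ih (i + 1) x hx; omega
    · have := ih (i + 1) x hx; omega

lemma pvJoin_cons (x : List Char) (xs : List (List Char)) :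
    PySem.Chars.join [] (x :: xs) = x ++ PySem.Chars.join [] xs := by
  cases xs <;> simp [PySem.Chars.join, List.intercalate]

lemma pvModifyHead_nil_append (xs : List (List Char)) :
    xs.modifyHead (fun x => [] ++ x) = xs := by
  cases xs <;> simp

lemma pvBuild_shift (l : List Char) (ls : List (List Char)) :
    ∀ (seps : List Int) (start : Int), 0 ≤ start → (∀ x ∈ seps, 0 ≤ x) →
      pvBuild (l :: ls) (seps.map (· + 1)) (start + 1) = pvBuild ls seps start := by
  intro seps
  induction seps with
  | nil =>
    intro start h0 _
    simp only [List.map_nil, pvBuild]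
    rw [PySem.List.slice_from _ (by omega), PySem.List.slice_from _ h0]
    have h1 : (start + 1).toNat = start.toNat + 1 := by omega
    simp [h1]
  | cons s rest ih =>
    intro start h0 hn
    have hs : 0 ≤ s := hn s (by simp)
    have h1 : (start + 1).toNat = start.toNat + 1 := by omega
    have h2 : (s + 1).toNat = s.toNat + 1 := by omega
    simp only [List.map_cons, pvBuild]
    rw [PySem.List.slice_toNat _ (by omega) (by omega), PySem.List.slice_toNat _ h0 hs,
        ih (s + 1) (by omega) (fun x hx => hn x (by simp [hx]))]
    simp [h1, h2, Nat.succ_sub_succ]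

lemma pvBuild_absorb (l : List Char) (ls : List (List Char)) :
    ∀ (seps : List Int), (∀ x ∈ seps, 0 ≤ x) →
      pvBuild (l :: ls) (seps.map (· + 1)) 0 = (pvBuild ls seps 0).modifyHead (l ++ ·) := by
  intro seps hn
  cases seps with
  | nil =>
    simp only [List.map_nil, pvBuild, List.modifyHead]
    rw [PySem.List.slice_from _ (by omega), PySem.List.slice_from _ (by omega)]
    simp [pvJoin_cons]
  | cons s rest =>
    have hs : 0 ≤ s := hn s (by simp)
    have h2 : (s + 1).toNat = s.toNat + 1 := by omega
    simp only [List.map_cons, pvBuild, List.modifyHead]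
    rw [PySem.List.slice_toNat _ (by omega) (by omega), PySem.List.slice_toNat _ (by omega) hs,
        pvBuild_shift l ls rest (s + 1) (by omega) (fun x hx => hn x (by simp [hx]))]
    simp [h2, pvJoin_cons]

lemma pvModifyHead_modifyHead (f g : List Char → List Char) (xs : List (List Char)) :
    (xs.modifyHead g).modifyHead f = xs.modifyHead (fun x => f (g x)) := by
  cases xs <;> simp

lemma pvFRec_eq_build (lines : List (List Char)) :
    ∀ acc : List Char,
      pvFRec lines acc = (pvBuild lines (pvSeps lines 0) 0).modifyHead (acc ++ ·) := by
  induction lines with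
  | nil =>
    intro acc
    simp [pvFRec, pvSeps, pvBuild, PySem.List.slice]
  | cons l ls ih =>
    intro acc
    have hshift := pvSeps_shift ls 0
    have hnn : ∀ x ∈ pvSeps ls 0, 0 ≤ x := fun x hx => pvSeps_nonneg ls 0 x hx
    by_cases h : PySem.Chars.startswith l [',', ','] = true
    · simp only [pvFRec, h, if_pos]
      have hsep : pvSeps (l :: ls) 0 = (0 : Int) :: (pvSeps ls 0).map (· + 1) := by
        simp [pvSeps, h, ← hshift]
      rw [hsep]
      simp only [pvBuild]
      rw [show (0 : Int) + 1 = 0 + 1 by ring,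
          pvBuild_shift l ls _ 0 (by omega) hnn,
          PySem.List.slice_toNat _ (by omega) (by omega)]
      rw [ih [], pvModifyHead_nil_append]
      simp [List.modifyHead]
    · simp only [pvFRec, h, if_neg, Bool.not_eq_true]
      have hsep : pvSeps (l :: ls) 0 = (pvSeps ls 0).map (· + 1) := by
        simp [pvSeps, h, ← hshift]
      rw [hsep, pvBuild_absorb l ls _ hnn, ih (acc ++ l), pvModifyHead_modifyHead]
      simp

lemma pvCore_eq (lines : List (List Char)) :
    (lines.foldl pvStepA ([], [])).2 ++ [(lines.foldl pvStepA ([], [])).1]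
      = pvBuild lines (pvSeps lines 0) 0 := by
  rw [pvFoldl_eq, pvFRec_eq_build, pvModifyHead_nil_append]
  simp

-- ===== VERDICT (by name: the statement is the Claim_ definition above) =====
theorem get_sections_spec : Claim_equal_get_sections := by
  intro csv _
  show (((pvSplitKeep csv.toList).foldl pvStepA ([], [])).2
          ++ [((pvSplitKeep csv.toList).foldl pvStepA ([], [])).1]).map String.ofList
      = (pvBuild (pvSplitKeep csv.toList) (pvSeps (pvSplitKeep csv.toList) 0) 0).map String.ofList
  rw [pvCore_eq]
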